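-- pv_equiv track=rewrite | github.com/stae1102/code-solving | baekjoon/2529 부등호 -1.py | getGreatestNum
-- ===== SOURCE A (Python) =====
-- def getGreatestNum(ies):
--     great = ['9']
--     tmp = 0
--     nums = [str(i) for i in range(9)]
--
--     for i in ies:
--         if i == "<":
--             great.insert(tmp, nums.pop())
--         else:
--             great.append(nums.pop())
--             tmp = len(great) - 1
--
--     return ''.join(great)
-- ===== SOURCE B (Python) =====
-- def getGreatestNum(ies):
--     pool = [str(d) for d in range(9, -1, -1)]
--     n = len(ies)
--     out = [None] * (n + 1)
--     stack = []
--     k = 0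
--     for i in range(n + 1):
--         stack.append(i)
--         if i == n or ies[i] != '<':
--             while stack:
--                 out[stack.pop()] = pool[k]
--                 k += 1
--     return ''.join(out)
-- ===== Notes on version B (the rewrite author's own statement) =====
-- stated objective: idiomatic
-- what changed: A builds the answer by repeatedly inserting the next smaller digit at a remembered pivot position inside a growing list; B makes one stack pass over positions 0..n, flushing the stack at each non-'<' sign (and at the end) to assign successive digits from a descending pool, which reverses each ascending run in place.
-- outside the precondition, e.g. on getGreatestNum('<<<<<<<<<<'): A raises IndexError, B raises IndexError
import Mathlib
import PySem

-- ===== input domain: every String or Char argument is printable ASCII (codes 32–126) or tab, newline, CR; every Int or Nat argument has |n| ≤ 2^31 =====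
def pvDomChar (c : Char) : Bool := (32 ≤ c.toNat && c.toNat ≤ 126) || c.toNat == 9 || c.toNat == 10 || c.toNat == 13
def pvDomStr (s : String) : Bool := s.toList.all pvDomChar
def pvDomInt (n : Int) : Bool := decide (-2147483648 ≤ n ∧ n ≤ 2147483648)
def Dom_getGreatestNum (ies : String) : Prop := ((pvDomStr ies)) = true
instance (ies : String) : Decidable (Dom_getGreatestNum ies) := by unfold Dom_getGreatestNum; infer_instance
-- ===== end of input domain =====

-- B replaces A's pivot-insertion into a growing list by a single stack pass that
-- reverses each ascending run in place (objective: idiomatic; same cost).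

-- ===== PORT A =====
-- loop body; state: (great, tmp, nums)
def pvStepA (st : List String × Nat × List String) (c : Char) : List String × Nat × List String :=
  let (great, tmp, nums) := st
  if c = '<' then
    match PySem.List.pop? nums (-1) with
    | some (v, nums') => (PySem.List.insert great (tmp : Int) v, tmp, nums')
    | none => st          -- nums.pop() on empty: IndexError in Python (≥ 10 signs); excluded by Pre_
  else
    match PySem.List.pop? nums (-1) with
    | some (v, nums') =>
      let g := great ++ [v]
      (g, g.length - 1, nums')
    | none => st          -- IndexError in Python; excluded by Pre_

def getGreatestNum (ies : String) : String :=
  let nums := (PySem.List.pyRange 0 9 1).map PySem.Int.toStr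
  let r := ies.toList.foldl pvStepA (["9"], 0, nums)
  PySem.Str.join "" r.1

-- ===== PORT B =====
-- inner 'while stack:' flush: pop positions, assign successive pool digits
def pvFlushB (pool : List String) : List (Option String) → List Int → Nat → List (Option String) × Nat
  | out, [], k => (out, k)
  | out, p :: rest, k =>
      pvFlushB pool (PySem.List.pySetD out p (some (PySem.List.pyGetD pool (k : Int) "?"))) rest (k + 1)
      -- pool[k] for k > 9: IndexError in Python (≥ 10 signs); excluded by Pre_

-- loop body; state: (out, stack, k)
def pvStepB (cs : List Char) (n : Nat) (pool : List String)
    (st : List (Option String) × List Int × Nat) (i : Int) : List (Option String) × List Int × Nat :=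
  let (out, stack, k) := st
  let stack := i :: stack
  if i = (n : Int) ∨ PySem.List.pyGetD cs i '?' ≠ '<' then
    let fl := pvFlushB pool out stack k
    (fl.1, ([] : List Int), fl.2)
  else (out, stack, k)

def getGreatestNum_alt (ies : String) : String :=
  let pool := (PySem.List.pyRange 9 (-1) (-1)).map PySem.Int.toStr
  let cs := ies.toList
  let n := cs.length
  let r := (PySem.List.pyRange 0 ((n : Int) + 1) 1).foldl (pvStepB cs n pool)
    (List.replicate (n + 1) (none : Option String), ([] : List Int), 0)
  -- under Pre_ every slot of out is filled (otherwise ''.join(out) is a TypeError in Python)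
  PySem.Str.join "" (r.1.map (fun o => o.getD "?"))

-- ===== PRECONDITION & SPEC =====
-- Pre_ excludes strings of 10 or more characters, on which A (and B) raises IndexError
-- (A pops once per sign from a 9-element digit list).
def Pre_getGreatestNum (ies : String) : Prop := ies.toList.length ≤ 9
instance (ies : String) : Decidable (Pre_getGreatestNum ies) := by unfold Pre_getGreatestNum; infer_instance

def pvWitness_getGreatestNum : String := "<><"

def Spec_getGreatestNum (ies : String) (out : String) : Prop := out = getGreatestNum_alt ies
instance (ies : String) (out : String) : Decidable (Spec_getGreatestNum ies out) := by unfold Spec_getGreatestNum; infer_instance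

-- ===== CLAIM (what is proved, stated in full; the proofs are below) =====
def Claim_equal_getGreatestNum : Prop := ∀ (ies : String), Dom_getGreatestNum ies → Pre_getGreatestNum ies → Spec_getGreatestNum ies (getGreatestNum ies)

-- ===== LEMMAS AND PROOFS =====

-- both programs look at a character only through 'is it "<"': work on that Bool mask
def pvMask (cs : List Char) : List Bool := cs.map (fun c => c == '<')

-- A's step on the mask, with the digit list evaluated to its literal value
def pvStepA' (st : List String × Nat × List String) (b : Bool) : List String × Nat × List String :=
  let (great, tmp, nums) := st
  if b then
    match PySem.List.pop? nums (-1) with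
    | some (v, nums') => (PySem.List.insert great (tmp : Int) v, tmp, nums')
    | none => st
  else
    match PySem.List.pop? nums (-1) with
    | some (v, nums') =>
      let g := great ++ [v]
      (g, g.length - 1, nums')
    | none => st

def pvA (bs : List Bool) : List String :=
  (bs.foldl pvStepA' (["9"], 0, ["0","1","2","3","4","5","6","7","8"])).1

-- B's loop on the mask, Nat indices, literal pool
def pvFlushB' (pool : List String) : List (Option String) → List Nat → Nat → List (Option String) × Nat
  | out, [], k => (out, k)
  | out, p :: rest, k =>
      pvFlushB' pool (out.set p (some (pool.getD k "?"))) rest (k + 1)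

def pvStepB' (bs : List Bool) (n : Nat) (pool : List String)
    (st : List (Option String) × List Nat × Nat) (i : Nat) : List (Option String) × List Nat × Nat :=
  let (out, stack, k) := st
  let stack := i :: stack
  if i = n ∨ ¬ bs.getD i false then
    let fl := pvFlushB' pool out stack k
    (fl.1, ([] : List Nat), fl.2)
  else (out, stack, k)

def pvB (bs : List Bool) : List (Option String) :=
  ((List.range (bs.length + 1)).foldl (pvStepB' bs bs.length ["9","8","7","6","5","4","3","2","1","0"])
    (List.replicate (bs.length + 1) (none : Option String), ([] : List Nat), 0)).1

-- ---- A-side bridge ----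
theorem pvStepA_eq (st : List String × Nat × List String) (c : Char) :
    pvStepA st c = pvStepA' st (c == '<') := by
  by_cases h : c = '<' <;> simp [pvStepA, pvStepA', h]

theorem pvFoldA_eq (cs : List Char) (st : List String × Nat × List String) :
    cs.foldl pvStepA st = (pvMask cs).foldl pvStepA' st := by
  induction cs generalizing st with
  | nil => rfl
  | cons c t ih =>
    simp only [pvMask, List.map_cons, List.foldl_cons, pvStepA_eq] at ih ⊢
    apply ih

theorem pvA_eq (ies : String) : getGreatestNum ies = PySem.Str.join "" (pvA (pvMask ies.toList)) := by
  have hnums : (PySem.List.pyRange 0 9 1).map PySem.Int.toStr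
      = ["0","1","2","3","4","5","6","7","8"] := by decide
  simp only [getGreatestNum, pvA, hnums, pvFoldA_eq]

-- ---- B-side bridge ----
theorem pvFlushB_eq (pool : List String) (out : List (Option String)) (stack : List Nat) (k : Nat) :
    pvFlushB pool out (stack.map (Nat.cast)) k = pvFlushB' pool out stack k := by
  induction stack generalizing out k with
  | nil => rfl
  | cons p rest ih =>
    simp only [List.map_cons, pvFlushB, pvFlushB', PySem.List.pySetD_natCast,
      PySem.List.pyGetD_natCast]
    exact ih _ _

theorem pvCondB_eq (cs : List Char) (i : Nat) :
    ((i : Int) = (cs.length : Int) ∨ PySem.List.pyGetD cs (i : Int) '?' ≠ '<')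
      ↔ (i = cs.length ∨ ¬ (pvMask cs).getD i false) := by
  by_cases hi : i < cs.length
  · constructor <;> intro h <;> rcases h with h | h
    · exact Or.inl (by exact_mod_cast h)
    · refine Or.inr ?_
      simp only [PySem.List.pyGetD_natCast, List.getD_eq_getElem?_getD, List.getElem?_eq_getElem hi,
        Option.getD_some] at h
      simp [pvMask, List.getD_eq_getElem?_getD, List.getElem?_map, List.getElem?_eq_getElem hi, h]
    · exact Or.inl (by exact_mod_cast h)
    · refine Or.inr ?_
      simp only [pvMask, List.getD_eq_getElem?_getD, List.getElem?_map,
        List.getElem?_eq_getElem hi, Option.map_some, Option.getD_some, Bool.not_eq_true,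
        beq_eq_false_iff_ne, ne_eq] at h
      simpa [PySem.List.pyGetD_natCast, List.getD_eq_getElem?_getD, List.getElem?_eq_getElem hi]
        using h
  · -- index past the end: both right disjuncts hold (default '?' ≠ '<', default mask false)
    have h1 : PySem.List.pyGetD cs (i : Int) '?' = '?' := by
      rw [PySem.List.pyGetD_natCast, List.getD_eq_getElem?_getD,
        List.getElem?_eq_none (by omega), Option.getD_none]
    have h2 : (pvMask cs).getD i false = false := by
      rw [List.getD_eq_getElem?_getD,
        List.getElem?_eq_none (by simp only [pvMask, List.length_map]; omega), Option.getD_none]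
    constructor <;> intro _
    · exact Or.inr (by rw [h2]; simp)
    · exact Or.inr (by rw [h1]; decide)

theorem pvStepB_eq (cs : List Char) (pool : List String)
    (out : List (Option String)) (stack : List Nat) (k : Nat) (i : Nat) :
    pvStepB cs cs.length pool (out, stack.map (Nat.cast), k) (i : Int)
      = (fun r => (r.1, r.2.1.map (Nat.cast), r.2.2))
          (pvStepB' (pvMask cs) cs.length pool (out, stack, k) i) := by
  simp only [pvStepB, pvStepB']
  by_cases h : i = cs.length ∨ ¬ (pvMask cs).getD i false
  · rw [if_pos ((pvCondB_eq cs i).mpr h), if_pos h]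
    have : ((i : Int) :: stack.map (Nat.cast)) = (i :: stack).map (Nat.cast) := by simp
    rw [this, pvFlushB_eq]
    simp
  · rw [if_neg (fun hc => h ((pvCondB_eq cs i).mp hc)), if_neg h]
    simp

theorem pvFoldB_eq (cs : List Char) (pool : List String) (l : List Nat)
    (out : List (Option String)) (stack : List Nat) (k : Nat) :
    (l.map (Nat.cast)).foldl (pvStepB cs cs.length pool) (out, stack.map (Nat.cast), k)
      = (fun r => (r.1, r.2.1.map (Nat.cast), r.2.2))
          (l.foldl (pvStepB' (pvMask cs) cs.length pool) (out, stack, k)) := by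
  induction l generalizing out stack k with
  | nil => rfl
  | cons i t ih =>
    simp only [List.map_cons, List.foldl_cons, pvStepB_eq]
    obtain ⟨o', s', k'⟩ := pvStepB' (pvMask cs) cs.length pool (out, stack, k) i
    exact ih o' s' k'

theorem pvB_eq (ies : String) :
    getGreatestNum_alt ies = PySem.Str.join "" ((pvB (pvMask ies.toList)).map (fun o => o.getD "?")) := by
  have hpool : (PySem.List.pyRange 9 (-1) (-1)).map PySem.Int.toStr
      = ["9","8","7","6","5","4","3","2","1","0"] := by decide
  have hrange : PySem.List.pyRange 0 ((ies.toList.length : Int) + 1) 1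
      = (List.range (ies.toList.length + 1)).map (Nat.cast) := by
    have := PySem.List.pyRange_zero_natCast (ies.toList.length + 1)
    simpa using this
  have hlen : (pvMask ies.toList).length = ies.toList.length := by simp [pvMask]
  simp only [getGreatestNum_alt, pvB, hpool, hrange, hlen]
  rw [show ([] : List Int) = ([] : List Nat).map (Nat.cast) from rfl, pvFoldB_eq]

-- ---- finite enumeration of the masks admitted by Pre_ ----
def pvAllBL : Nat → List (List Bool)
  | 0 => [[]]
  | n + 1 => [] :: (pvAllBL n).flatMap (fun bs => [true :: bs, false :: bs])

theorem pvAllBL_mem : ∀ (n : Nat) (bs : List Bool), bs.length ≤ n → bs ∈ pvAllBL n := by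
  intro n
  induction n with
  | zero =>
    intro bs h
    cases bs with
    | nil => simp [pvAllBL]
    | cons b t => simp at h
  | succ n ih =>
    intro bs h
    cases bs with
    | nil => simp [pvAllBL]
    | cons b t =>
      have ht : t ∈ pvAllBL n := ih t (by simpa using h)
      simp only [pvAllBL, List.mem_cons, List.mem_flatMap]
      refine Or.inr ⟨t, ht, ?_⟩
      cases b <;> simp

set_option maxRecDepth 100000 in
set_option maxHeartbeats 4000000 in
theorem pvAllBL_check :
    (pvAllBL 9).all (fun bs => pvA bs == (pvB bs).map (fun o => o.getD "?")) = true := by decide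

theorem pvAB (bs : List Bool) (h : bs.length ≤ 9) :
    pvA bs = (pvB bs).map (fun o => o.getD "?") := by
  have := List.all_eq_true.mp pvAllBL_check bs (pvAllBL_mem 9 bs h)
  simpa using this

-- ===== VERDICT (by name: the statement is the Claim_ definition above) =====
theorem getGreatestNum_spec : Claim_equal_getGreatestNum := by
  intro ies _ hpre
  unfold Spec_getGreatestNum
  rw [pvA_eq, pvB_eq, pvAB _ (by simpa [pvMask] using hpre)]
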